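-- pv_equiv track=rewrite | github.com/AyhanErcan70/SATTUP | app/core/db_manager.py | _ranges_overlap
-- ===== SOURCE A (Python) =====
-- def _ranges_overlap(a_start: int, a_end: int, b_start: int, b_end: int) -> bool:
--     def _segments(s: int, e: int):
--         if s < 0 or e < 0:
--             return []
--         if s == e:
--             return [(s, (s + 1) % 1440)]
--         if s < e:
--             return [(s, e)]
--         return [(s, 1440), (0, e)]
--
--     for s1, e1 in _segments(int(a_start), int(a_end)):
--         for s2, e2 in _segments(int(b_start), int(b_end)):
--             if max(s1, s2) < min(e1, e2):
--                 return True
--     return False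
-- ===== SOURCE B (Python) =====
-- def _ranges_overlap(a_start: int, a_end: int, b_start: int, b_end: int) -> bool:
--     a_s, a_e, b_s, b_e = int(a_start), int(a_end), int(b_start), int(b_end)
--
--     def contains(s, e, t):
--         # is minute t inside the occupied set of range (s, e)?
--         if s < 0 or e < 0:
--             return False
--         if s == e:
--             return s <= t < (s + 1) % 1440
--         if s < e:
--             return s <= t < e
--         return s <= t < 1440 or 0 <= t < e
--
--     def starts(s, e):
--         # candidate points: the left endpoints of the range's pieces
--         if s < 0 or e < 0:
--             return []
--         if s > e:
--             return [s, 0]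
--         return [s]
--
--     return any(contains(a_s, a_e, t) and contains(b_s, b_e, t)
--                for t in starts(a_s, a_e) + starts(b_s, b_e))
-- ===== Notes on version B (the rewrite author's own statement) =====
-- stated objective: alternative
-- what changed: Replaces A's materialized segment lists and nested endpoint comparisons (max<min over segment pairs) with a point-membership test: each range's candidate start minutes are checked against a direct contains predicate for both ranges.
import Mathlib
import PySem

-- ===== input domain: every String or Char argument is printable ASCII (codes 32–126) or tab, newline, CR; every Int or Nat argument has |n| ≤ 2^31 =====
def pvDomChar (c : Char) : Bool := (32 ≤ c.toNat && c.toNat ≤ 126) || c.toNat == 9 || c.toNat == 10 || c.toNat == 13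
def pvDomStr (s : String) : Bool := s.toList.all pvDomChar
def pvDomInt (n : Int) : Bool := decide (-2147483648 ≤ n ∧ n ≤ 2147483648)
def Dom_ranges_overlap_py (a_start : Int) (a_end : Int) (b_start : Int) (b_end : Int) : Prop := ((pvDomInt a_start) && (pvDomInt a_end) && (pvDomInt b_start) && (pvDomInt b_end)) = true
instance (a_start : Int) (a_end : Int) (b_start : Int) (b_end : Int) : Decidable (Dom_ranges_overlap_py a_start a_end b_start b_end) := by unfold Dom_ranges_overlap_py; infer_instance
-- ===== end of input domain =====

-- B replaces A's segment-pair endpoint comparisons with membership tests of candidate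
-- start minutes in a direct contains predicate (alternative decomposition, same cost).

-- ===== PORT A =====
-- inner helper _segments of A
def pvSegsA (s : Int) (e : Int) : List (Int × Int) :=
  if s < 0 ∨ e < 0 then []
  else if s = e then [(s, PySem.Int.mod (s + 1) 1440)]
  else if s < e then [(s, e)]
  else [(s, 1440), (0, e)]

def ranges_overlap_py (a_start : Int) (a_end : Int) (b_start : Int) (b_end : Int) : Bool :=
  (pvSegsA a_start a_end).any (fun p1 =>
    (pvSegsA b_start b_end).any (fun p2 =>
      decide (max p1.1 p2.1 < min p1.2 p2.2)))

-- ===== PORT B =====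
-- is minute t inside the occupied set of range (s, e)?
def pvContainsB (s : Int) (e : Int) (t : Int) : Bool :=
  if s < 0 ∨ e < 0 then false
  else if s = e then decide (s ≤ t ∧ t < PySem.Int.mod (s + 1) 1440)
  else if s < e then decide (s ≤ t ∧ t < e)
  else decide ((s ≤ t ∧ t < 1440) ∨ (0 ≤ t ∧ t < e))

-- candidate points: the left endpoints of the range's pieces
def pvStartsB (s : Int) (e : Int) : List Int :=
  if s < 0 ∨ e < 0 then []
  else if s > e then [s, 0]
  else [s]

def ranges_overlap_py_alt (a_start : Int) (a_end : Int) (b_start : Int) (b_end : Int) : Bool :=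
  (pvStartsB a_start a_end ++ pvStartsB b_start b_end).any (fun t =>
    pvContainsB a_start a_end t && pvContainsB b_start b_end t)

-- ===== PRECONDITION & SPEC =====
def Spec_ranges_overlap_py (a_start : Int) (a_end : Int) (b_start : Int) (b_end : Int) (out : Bool) : Prop := out = ranges_overlap_py_alt a_start a_end b_start b_end
instance (a_start : Int) (a_end : Int) (b_start : Int) (b_end : Int) (out : Bool) : Decidable (Spec_ranges_overlap_py a_start a_end b_start b_end out) := by unfold Spec_ranges_overlap_py; infer_instance

-- ===== CLAIM (what is proved, stated in full; the proofs are below) =====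
def Claim_equal_ranges_overlap_py : Prop := ∀ (a_start : Int) (a_end : Int) (b_start : Int) (b_end : Int), Dom_ranges_overlap_py a_start a_end b_start b_end → Spec_ranges_overlap_py a_start a_end b_start b_end (ranges_overlap_py a_start a_end b_start b_end)

-- ===== LEMMAS AND PROOFS =====

-- ===== VERDICT (by name: the statement is the Claim_ definition above) =====
theorem ranges_overlap_py_spec : Claim_equal_ranges_overlap_py := by
  intro a_start a_end b_start b_end _
  unfold Spec_ranges_overlap_py ranges_overlap_py ranges_overlap_py_alt
  unfold pvSegsA pvStartsB pvContainsB
  apply Bool.eq_iff_iff.mpr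
  split_ifs <;>
    simp only [List.any_cons, List.any_nil, List.any_append, Bool.or_eq_true,
      Bool.and_eq_true, Bool.false_eq_true, decide_eq_true_eq,
      false_and, and_false, or_false] <;>
    (try generalize PySem.Int.mod (a_start + 1) 1440 = ma) <;>
    (try generalize PySem.Int.mod (b_start + 1) 1440 = mb) <;>
    omega
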